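-- pv_equiv track=rewrite | github.com/kittytastic/Peano-Fork | python/misc/addTest.py | forwardDeclaration
-- ===== SOURCE A (Python) =====
-- def forwardDeclaration(vdict):
--     """
--     Generate the nested namespace forward declaration
--     """
--     s=""
--     for num, nsp in enumerate(vdict["NAMESPACE"].split("::")):
--         s+= num*2*" " + "namespace {} {{\n".format(nsp)
--
--     LEN = len(vdict["NAMESPACE"].split("::"))
--
--     s+= "{}namespace tests {{\n{}class {}Test;\n{}}}\n".format(LEN*"  ", (LEN+1)*"  ", vdict["TESTNAME"], LEN*"  ")
--
--     for num in range(LEN):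
--         s+= (LEN-num-1)*"  " + "}\n"
--
--     return s
-- ===== SOURCE B (Python) =====
-- def forwardDeclaration(vdict):
--     """
--     Generate the nested namespace forward declaration
--     """
--     testname = vdict["TESTNAME"]
--
--     def wrap(parts, depth):
--         ind = depth * "  "
--         if not parts:
--             return (ind + "namespace tests {\n"
--                     + (depth + 1) * "  " + "class " + testname + "Test;\n"
--                     + ind + "}\n")
--         return (ind + "namespace " + parts[0] + " {\n"
--                 + wrap(parts[1:], depth + 1)
--                 + ind + "}\n")
--
--     return wrap(vdict["NAMESPACE"].split("::"), 0)
-- ===== Notes on version B (the rewrite author's own statement) =====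
-- stated objective: alternative
-- what changed: Replaces the two flat loops plus middle block by one recursive helper that wraps the tests/class block in namespace layers from the inside out, emitting each open and its matching close in the same call.
import Mathlib
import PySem

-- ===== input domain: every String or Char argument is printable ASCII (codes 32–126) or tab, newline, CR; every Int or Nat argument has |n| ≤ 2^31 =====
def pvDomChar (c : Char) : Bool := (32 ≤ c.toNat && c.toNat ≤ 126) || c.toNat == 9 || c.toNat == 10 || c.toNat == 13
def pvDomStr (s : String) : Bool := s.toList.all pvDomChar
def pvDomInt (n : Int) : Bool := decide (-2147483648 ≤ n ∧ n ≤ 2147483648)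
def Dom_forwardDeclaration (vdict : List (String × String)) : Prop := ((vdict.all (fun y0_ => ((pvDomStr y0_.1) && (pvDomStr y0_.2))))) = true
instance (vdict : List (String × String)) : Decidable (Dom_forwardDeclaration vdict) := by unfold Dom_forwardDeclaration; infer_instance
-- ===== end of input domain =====

-- B replaces the two flat loops plus middle block with one inside-out recursive wrapper (objective: alternative decomposition).

-- ===== PORT A =====
-- dict lookup (first match) shared by both ports
def pvLookup (vdict : List (String × String)) (k : String) : Option String :=
  (vdict.find? (fun p => p.1 == k)).map (·.2)

-- n * " "  (Python string repetition)
def pvSp (n : Int) : String := String.mk (PySem.List.pyRepeat " ".toList n)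
-- n * "  "
def pvInd (n : Int) : String := String.mk (PySem.List.pyRepeat "  ".toList n)

def forwardDeclaration (vdict : List (String × String)) : String :=
  match pvLookup vdict "NAMESPACE", pvLookup vdict "TESTNAME" with
  | some ns, some tn =>
      let parts := (PySem.Str.split? ns "::").getD []
      let s := (PySem.List.enumerate parts).foldl
        (fun s p => s ++ pvSp (p.1 * 2) ++ "namespace " ++ p.2 ++ " {\n") ""
      let L : Int := parts.length
      let s := s ++ pvInd L ++ "namespace tests {\n" ++ pvInd (L + 1) ++ "class " ++ tn
               ++ "Test;\n" ++ pvInd L ++ "}\n"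
      (PySem.List.pyRange 0 L 1).foldl (fun s num => s ++ pvInd (L - num - 1) ++ "}\n") s
  | _, _ => ""  -- KeyError: excluded by Pre_

-- ===== PORT B =====
def fdLookup (vdict : List (String × String)) (k : String) : Option String :=
  (vdict.find? (fun p => p.1 == k)).map (·.2)

-- n * "  "  (Python string repetition)
def fdInd (n : Int) : String := String.mk (PySem.List.pyRepeat "  ".toList n)

def fdWrap (tn : String) (parts : List String) (depth : Nat) : String :=
  match parts with
  | [] =>
      fdInd depth ++ "namespace tests {\n" ++ fdInd ((depth : Int) + 1) ++ "class " ++ tn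
        ++ "Test;\n" ++ fdInd depth ++ "}\n"
  | h :: t =>
      fdInd depth ++ "namespace " ++ h ++ " {\n" ++ fdWrap tn t (depth + 1)
        ++ fdInd depth ++ "}\n"

def forwardDeclaration_alt (vdict : List (String × String)) : String :=
  match fdLookup vdict "TESTNAME" with
  | none => ""  -- KeyError: excluded by Pre_
  | some tn =>
    match fdLookup vdict "NAMESPACE" with
    | none => ""  -- KeyError: excluded by Pre_
    | some ns => fdWrap tn ((PySem.Str.split? ns "::").getD []) 0

-- ===== PRECONDITION & SPEC =====
-- Pre_ excludes exactly the dicts missing the key "NAMESPACE" or "TESTNAME", on which A raises KeyError.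
def Pre_forwardDeclaration (vdict : List (String × String)) : Prop :=
  ((vdict.find? (fun p => p.1 == "NAMESPACE")).isSome = true) ∧
  ((vdict.find? (fun p => p.1 == "TESTNAME")).isSome = true)
instance (vdict : List (String × String)) : Decidable (Pre_forwardDeclaration vdict) := by
  unfold Pre_forwardDeclaration; infer_instance

def pvWitness_forwardDeclaration : (List (String × String)) :=
  [("NAMESPACE", "a::b"), ("TESTNAME", "Foo")]

def Spec_forwardDeclaration (vdict : List (String × String)) (out : String) : Prop :=
  out = forwardDeclaration_alt vdict
instance (vdict : List (String × String)) (out : String) :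
    Decidable (Spec_forwardDeclaration vdict out) := by
  unfold Spec_forwardDeclaration; infer_instance

-- ===== CLAIM (what is proved, stated in full; the proofs are below) =====
def Claim_equal_forwardDeclaration : Prop :=
  ∀ (vdict : List (String × String)), Dom_forwardDeclaration vdict →
    Pre_forwardDeclaration vdict →
    Spec_forwardDeclaration vdict (forwardDeclaration vdict)

-- ===== LEMMAS AND PROOFS =====

theorem fdInd_eq (n : Int) : fdInd n = pvInd n := rfl

theorem fdLookup_eq (vdict : List (String × String)) (k : String) :
    fdLookup vdict k = pvLookup vdict k := rfl

-- the open-namespace lines from depth d on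
def fdOpens : List String → Nat → String
  | [], _ => ""
  | h :: t, d => pvInd d ++ "namespace " ++ h ++ " {\n" ++ fdOpens t (d + 1)

-- the tests/class middle block at depth L
def fdMid (L : Nat) (tn : String) : String :=
  pvInd L ++ "namespace tests {\n" ++ pvInd ((L : Int) + 1) ++ "class " ++ tn
    ++ "Test;\n" ++ pvInd L ++ "}\n"

-- the closing braces for depths d+n-1 down to d
def fdCloses : Nat → Nat → String
  | _, 0 => ""
  | d, n + 1 => pvInd ((d : Int) + n) ++ "}\n" ++ fdCloses d n

theorem pvFlatOne (n : Nat) : (List.replicate n [' ']).flatten = List.replicate n ' ' := by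
  induction n with
  | zero => rfl
  | succ m ih => simp [List.replicate_succ, ih]

theorem pvFlatTwo (n : Nat) : (List.replicate n [' ', ' ']).flatten = List.replicate (2 * n) ' ' := by
  induction n with
  | zero => rfl
  | succ m ih =>
      rw [show 2 * (m + 1) = 2 * m + 1 + 1 by ring]
      simp [List.replicate_succ, ih]

theorem pvSp_two (d : Nat) : pvSp ((d : Int) * 2) = pvInd d := by
  unfold pvSp pvInd PySem.List.pyRepeat
  congr 1
  rw [show " ".toList = [' '] from rfl, show "  ".toList = [' ', ' '] from rfl,
    show ((d : Int) * 2).toNat = 2 * d by omega, show ((d : Int)).toNat = d by omega,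
    pvFlatOne, pvFlatTwo]

theorem fdCloses_shift (d n : Nat) :
    fdCloses d (n + 1) = fdCloses (d + 1) n ++ pvInd d ++ "}\n" := by
  induction n with
  | zero => simp [fdCloses]
  | succ m ih =>
      rw [show fdCloses d (m + 1 + 1) = pvInd ((d : Int) + (m + 1)) ++ "}\n" ++ fdCloses d (m + 1) from rfl, ih]
      rw [show fdCloses (d + 1) (m + 1) = pvInd (((d + 1 : Nat) : Int) + m) ++ "}\n" ++ fdCloses (d + 1) m from rfl]
      have : ((d : Int) + (m + 1)) = (((d + 1 : Nat) : Int) + m) := by push_cast; ring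
      rw [this]
      simp [String.append_assoc]

theorem fdWrap_eq (tn : String) (parts : List String) :
    ∀ d : Nat, fdWrap tn parts d
      = fdOpens parts d ++ fdMid (d + parts.length) tn ++ fdCloses d parts.length := by
  induction parts with
  | nil => intro d; simp [fdWrap, fdOpens, fdCloses, fdMid, fdInd_eq]
  | cons h t ih =>
      intro d
      rw [show fdWrap tn (h :: t) d
            = fdInd d ++ "namespace " ++ h ++ " {\n" ++ fdWrap tn t (d + 1)
              ++ fdInd d ++ "}\n" from rfl, ih (d + 1), fdInd_eq]
      rw [show fdOpens (h :: t) d = pvInd d ++ "namespace " ++ h ++ " {\n" ++ fdOpens t (d + 1) from rfl]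
      rw [show (h :: t).length = t.length + 1 from rfl, fdCloses_shift d t.length,
        show d + (t.length + 1) = d + 1 + t.length by omega]
      simp [String.append_assoc]

theorem opens_foldl (parts : List String) :
    ∀ (d : Nat) (s : String),
      (PySem.List.enumerate parts (d : Int)).foldl
        (fun s p => s ++ pvSp (p.1 * 2) ++ "namespace " ++ p.2 ++ " {\n") s
      = s ++ fdOpens parts d := by
  induction parts with
  | nil => intro d s; simp [PySem.List.enumerate, fdOpens]
  | cons h t ih =>
      intro d s
      rw [PySem.List.enumerate_cons, List.foldl_cons]
      have : ((d : Int) + 1) = (((d + 1 : Nat)) : Int) := by push_cast; ring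
      rw [this, ih (d + 1)]
      rw [pvSp_two d]
      simp [fdOpens, String.append_assoc]

theorem closes_foldl :
    ∀ (n : Nat) (a L : Int), a + n = L → ∀ s : String,
      (PySem.List.pyRange a L 1).foldl (fun s num => s ++ pvInd (L - num - 1) ++ "}\n") s
      = s ++ fdCloses 0 n := by
  intro n
  induction n with
  | zero =>
      intro a L h s
      have : a = L := by omega
      subst this
      simp [PySem.List.pyRange, fdCloses]
  | succ m ih =>
      intro a L h s
      have hlt : a < L := by omega
      rw [PySem.List.pyRange_one_cons hlt, List.foldl_cons]
      rw [ih (a + 1) L (by omega)]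
      rw [show fdCloses 0 (m + 1) = pvInd (((0 : Nat) : Int) + m) ++ "}\n" ++ fdCloses 0 m from rfl]
      have : L - a - 1 = (((0 : Nat) : Int) + m) := by omega
      rw [this]
      simp [String.append_assoc]

-- ===== VERDICT (by name: the statement is the Claim_ definition above) =====
theorem forwardDeclaration_spec : Claim_equal_forwardDeclaration := by
  intro vdict _ hPre
  unfold Spec_forwardDeclaration forwardDeclaration forwardDeclaration_alt
  obtain ⟨h1, h2⟩ := hPre
  obtain ⟨ns, hns⟩ := Option.isSome_iff_exists.mp h1
  obtain ⟨tn, htn⟩ := Option.isSome_iff_exists.mp h2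
  have hns' : pvLookup vdict "NAMESPACE" = some ns.2 := by
    unfold pvLookup; rw [hns]; rfl
  have htn' : pvLookup vdict "TESTNAME" = some tn.2 := by
    unfold pvLookup; rw [htn]; rfl
  rw [hns', htn', fdLookup_eq, fdLookup_eq, hns', htn']
  simp only
  set parts := (PySem.Str.split? ns.2 "::").getD [] with hparts
  have hA0 := opens_foldl parts 0
  have h0 : ((0 : Nat) : Int) = 0 := by norm_num
  rw [h0] at hA0
  rw [hA0]
  rw [closes_foldl parts.length 0 (parts.length : Int) (by omega)]
  rw [fdWrap_eq tn.2 parts 0]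
  simp [fdMid, String.append_assoc]
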